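-- pv_equiv track=rewrite | github.com/GSofoyan/examen-a-d | A&D - intro/ritsen.py | weven
-- ===== SOURCE A (Python) =====
-- def weven(lijst1, lijst2):
--     if len(lijst1) <= len(lijst2):
--         kort = lijst1
--         lang = lijst2
--     else:
--         kort = lijst2
--         lang = lijst1
--
--     newlijst =[]
--     j = 0 #gaan we later nodig hebben als i uit range is van kortste (dit niet in loop zetten anders gaat het elke keer resetten naar 0)
--     for i in range(len(lang)):       #dit runnen tot korte fully in zit , daarna is index i een error voor de korte , dus onderste deel
--         if i < len(kort):
--             newlijst.append(lijst1[i])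
--             newlijst.append(lijst2[i])
--
--         else:
--             if lang == lijst1:      #voor volgorde te behouden van lijst 1 eerst
--                 newlijst.append(lijst1[i])
--
--                 if j < len(kort):
--                     newlijst.append(lijst2[j])
--                     j += 1
--                 else:
--                     j = 0                           #als j uit range: reset
--                     newlijst.append(lijst2[j])
--                     j += 1
--
--
--             else: #kort == lijst1
--                 if j < len(kort):
--                     newlijst.append(lijst1[j])
--                     j += 1
--                 else:
--                     j = 0
--                     newlijst.append(lijst1[j])
--                     j += 1
--                 newlijst.append(lijst2[i])
--
--     return newlijst
-- ===== SOURCE B (Python) =====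
-- def weven(lijst1, lijst2):
--     n = max(len(lijst1), len(lijst2))
--     ext1 = [lijst1[i % len(lijst1)] for i in range(n)]
--     ext2 = [lijst2[i % len(lijst2)] for i in range(n)]
--     return [x for pair in zip(ext1, ext2) for x in pair]
-- ===== Notes on version B (the rewrite author's own statement) =====
-- stated objective: simpler
-- what changed: A's two-phase loop (direct pairing, then wraparound cycling via a manually reset counter j inside a lang==lijst1 branch) is replaced by extending both lists to the longer length with modulo indexing and interleaving the two extended lists with zip.
-- outside the precondition, e.g. on weven([1, 2], []): A raises IndexError, B raises ZeroDivisionError; on weven([], [5]): A raises IndexError, B raises ZeroDivisionError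
import Mathlib
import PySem

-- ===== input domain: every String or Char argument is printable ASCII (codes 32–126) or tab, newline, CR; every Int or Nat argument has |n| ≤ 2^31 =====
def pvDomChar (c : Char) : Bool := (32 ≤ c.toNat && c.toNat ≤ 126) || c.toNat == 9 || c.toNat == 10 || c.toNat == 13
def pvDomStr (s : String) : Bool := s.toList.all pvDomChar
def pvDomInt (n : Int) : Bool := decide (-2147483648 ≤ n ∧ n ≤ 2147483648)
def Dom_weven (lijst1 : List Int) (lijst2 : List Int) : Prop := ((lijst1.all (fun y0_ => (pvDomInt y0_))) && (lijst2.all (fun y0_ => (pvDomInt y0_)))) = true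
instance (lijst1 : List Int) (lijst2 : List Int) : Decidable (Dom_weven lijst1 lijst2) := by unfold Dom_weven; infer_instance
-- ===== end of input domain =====

-- B replaces A's two-phase loop (direct zip phase, then manual reset-counter cycling with a
-- lang==lijst1 branch) by extending both lists to the longer length via modulo indexing and
-- interleaving them with zip; objective: simpler.

-- ===== PORT A =====
-- the body of A's for-loop, state = (newlijst, j)
def wevenStep (lijst1 lijst2 kort lang : List Int) (st : List Int × Nat) (i : Nat) : List Int × Nat :=
  if i < kort.length then
    (st.1 ++ [lijst1.getD i 0, lijst2.getD i 0], st.2)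
  else
    if lang = lijst1 then
      if st.2 < kort.length then
        (st.1 ++ [lijst1.getD i 0, lijst2.getD st.2 0], st.2 + 1)
      else
        (st.1 ++ [lijst1.getD i 0, lijst2.getD 0 0], 1)
    else
      if st.2 < kort.length then
        (st.1 ++ [lijst1.getD st.2 0, lijst2.getD i 0], st.2 + 1)
      else
        (st.1 ++ [lijst1.getD 0 0, lijst2.getD i 0], 1)

def weven (lijst1 : List Int) (lijst2 : List Int) : List Int :=
  let kort := if lijst1.length ≤ lijst2.length then lijst1 else lijst2
  let lang := if lijst1.length ≤ lijst2.length then lijst2 else lijst1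
  ((List.range lang.length).foldl (wevenStep lijst1 lijst2 kort lang) ([], 0)).1

-- ===== PORT B =====
def weven_alt (lijst1 : List Int) (lijst2 : List Int) : List Int :=
  let n := max lijst1.length lijst2.length
  let ext1 := (List.range n).map (fun i => lijst1.getD (i % lijst1.length) 0)
  let ext2 := (List.range n).map (fun i => lijst2.getD (i % lijst2.length) 0)
  (ext1.zip ext2).flatMap (fun p => [p.1, p.2])

-- ===== PRECONDITION & SPEC =====
-- Pre_ excludes exactly the inputs where one list is empty and the other is not:
-- there A raises IndexError (and B raises ZeroDivisionError), so neither returns a value.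
def Pre_weven (lijst1 : List Int) (lijst2 : List Int) : Prop := (lijst1 = [] ↔ lijst2 = [])
instance (lijst1 : List Int) (lijst2 : List Int) : Decidable (Pre_weven lijst1 lijst2) := by unfold Pre_weven; infer_instance
def pvWitness_weven : List Int × List Int := ([1, 2, 3, 4, 5], [10, 20])

def Spec_weven (lijst1 : List Int) (lijst2 : List Int) (out : List Int) : Prop := out = weven_alt lijst1 lijst2
instance (lijst1 : List Int) (lijst2 : List Int) (out : List Int) : Decidable (Spec_weven lijst1 lijst2 out) := by unfold Spec_weven; infer_instance

-- ===== CLAIM (what is proved, stated in full; the proofs are below) =====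
def Claim_equal_weven : Prop := ∀ (lijst1 : List Int) (lijst2 : List Int), Dom_weven lijst1 lijst2 → Pre_weven lijst1 lijst2 → Spec_weven lijst1 lijst2 (weven lijst1 lijst2)

-- ===== LEMMAS AND PROOFS =====

-- the interleaved sequence both programs produce, as one flatMap
def wevenF (lijst1 lijst2 : List Int) (i : Nat) : List Int :=
  [lijst1.getD (i % lijst1.length) 0, lijst2.getD (i % lijst2.length) 0]

lemma alt_eq_flatMap (l1 l2 : List Int) :
    weven_alt l1 l2 = (List.range (max l1.length l2.length)).flatMap (wevenF l1 l2) := by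
  show ((((List.range (max l1.length l2.length)).map (fun i => l1.getD (i % l1.length) 0)).zip
      ((List.range (max l1.length l2.length)).map (fun i => l2.getD (i % l2.length) 0))).flatMap
      (fun p => [p.1, p.2])) = _
  rw [List.zip_map', List.flatMap_map]
  rfl

lemma mod_succ_of_pos (m k : Nat) (hm : 0 < m) :
    m % k = ((m - 1) % k + 1) % k := by
  obtain ⟨m', rfl⟩ : ∃ m', m = m' + 1 := ⟨m - 1, by omega⟩
  simp only [Nat.add_sub_cancel]
  rw [Nat.add_mod m' 1 k, Nat.add_mod (m' % k) 1 k, Nat.mod_mod_of_dvd _ dvd_rfl]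

-- loop invariant for the case len l1 ≤ len l2 (kort = l1, lang = l2)
lemma foldl_le (l1 l2 : List Int) (h1 : 0 < l1.length)
    (m : Nat) (hm : m ≤ l2.length) :
    (List.range m).foldl (wevenStep l1 l2 l1 l2) ([], 0)
      = ((List.range m).flatMap (wevenF l1 l2),
         if m ≤ l1.length then 0 else (m - 1) % l1.length + 1) := by
  induction m with
  | zero => simp
  | succ m ih =>
    rw [List.range_succ, List.foldl_append, ih (by omega), List.flatMap_append]
    simp only [List.foldl_cons, List.foldl_nil, List.flatMap_cons, List.flatMap_nil,
      List.append_nil]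
    by_cases hc : m < l1.length
    · have h2 : m < l2.length := by omega
      simp [wevenStep, wevenF, hc, Nat.mod_eq_of_lt hc, Nat.mod_eq_of_lt h2,
        show m ≤ l1.length from hc.le, show m + 1 ≤ l1.length from hc]
    · have h2 : m < l2.length := by omega
      have hne : ¬(l2 = l1) := by
        intro h; rw [h] at h2; omega
      have hm2 : m % l2.length = m := Nat.mod_eq_of_lt h2
      by_cases heq : m = l1.length
      · subst heq
        simp [wevenStep, wevenF, hne, h1, hm2, Nat.mod_self]
      · have hif : ¬(m ≤ l1.length) := by omega
        have hmod : m % l1.length = ((m - 1) % l1.length + 1) % l1.length :=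
          mod_succ_of_pos m l1.length (by omega)
        by_cases hjk : (m - 1) % l1.length + 1 < l1.length
        · have hx : m % l1.length = (m - 1) % l1.length + 1 := by
            rw [hmod, Nat.mod_eq_of_lt hjk]
          simp [wevenStep, wevenF, hc, hne, hif, hjk, hm2, hx]
        · have hj : (m - 1) % l1.length + 1 = l1.length := by
            have := Nat.mod_lt (m - 1) h1
            omega
          have hx : m % l1.length = 0 := by rw [hmod, hj, Nat.mod_self]
          simp [wevenStep, wevenF, hc, hne, hif, hjk, hm2, hx]

-- loop invariant for the case len l2 < len l1 (kort = l2, lang = l1)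
lemma foldl_gt (l1 l2 : List Int) (h2 : 0 < l2.length)
    (m : Nat) (hm : m ≤ l1.length) :
    (List.range m).foldl (wevenStep l1 l2 l2 l1) ([], 0)
      = ((List.range m).flatMap (wevenF l1 l2),
         if m ≤ l2.length then 0 else (m - 1) % l2.length + 1) := by
  induction m with
  | zero => simp
  | succ m ih =>
    rw [List.range_succ, List.foldl_append, ih (by omega), List.flatMap_append]
    simp only [List.foldl_cons, List.foldl_nil, List.flatMap_cons, List.flatMap_nil,
      List.append_nil]
    by_cases hc : m < l2.length
    · have h1 : m < l1.length := by omega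
      simp [wevenStep, wevenF, hc, Nat.mod_eq_of_lt hc, Nat.mod_eq_of_lt h1,
        show m + 1 ≤ l2.length from hc, show m ≤ l2.length from hc.le]
    · have h1 : m < l1.length := by omega
      have hm1 : m % l1.length = m := Nat.mod_eq_of_lt h1
      by_cases heq : m = l2.length
      · subst heq
        simp [wevenStep, wevenF, h2, hm1, Nat.mod_self]
      · have hif : ¬(m ≤ l2.length) := by omega
        have hmod : m % l2.length = ((m - 1) % l2.length + 1) % l2.length :=
          mod_succ_of_pos m l2.length (by omega)
        by_cases hjk : (m - 1) % l2.length + 1 < l2.length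
        · have hx : m % l2.length = (m - 1) % l2.length + 1 := by
            rw [hmod, Nat.mod_eq_of_lt hjk]
          simp [wevenStep, wevenF, hc, hif, hjk, hm1, hx]
        · have hj : (m - 1) % l2.length + 1 = l2.length := by
            have := Nat.mod_lt (m - 1) h2
            omega
          have hx : m % l2.length = 0 := by rw [hmod, hj, Nat.mod_self]
          simp [wevenStep, wevenF, hc, hif, hjk, hm1, hx]

-- ===== VERDICT (by name: the statement is the Claim_ definition above) =====
theorem weven_spec : Claim_equal_weven := by
  intro l1 l2 _ hpre
  unfold Spec_weven weven
  rcases eq_or_ne l1 [] with h1 | h1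
  · have h2 : l2 = [] := hpre.mp h1
    subst h1; subst h2; rfl
  · have h2 : l2 ≠ [] := fun h => h1 (hpre.mpr h)
    have h1' : 0 < l1.length := List.length_pos_of_ne_nil h1
    have h2' : 0 < l2.length := List.length_pos_of_ne_nil h2
    by_cases hle : l1.length ≤ l2.length
    · simp only [hle, if_true]
      rw [foldl_le l1 l2 h1' l2.length le_rfl, alt_eq_flatMap, Nat.max_eq_right hle]
    · simp only [hle, if_false]
      rw [foldl_gt l1 l2 h2' l1.length le_rfl, alt_eq_flatMap,
        Nat.max_eq_left (by omega)]
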